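-- pv_equiv track=rewrite | github.com/sglitzinger/idses | experiment_3_core_types/dssched_biglittle_vararea_3coretypes.py | get_procs_in_group
-- ===== SOURCE A (Python) =====
-- def get_groups(proc, procs):
--     groups = []
--     group = procs + proc - 1
--     while group > 0:
--         groups.append(group)
--         group = group // 2
--     groups.reverse()
--     return groups
--
-- def get_procs_in_group(group, cores):
--     if group >= cores:
--         return [group-cores+1]
--     else:
--         procs_in_group = []
--         for i in range(1,cores+1):
--             if group in get_groups(i, cores):
--                 procs_in_group.append(i)
--         return procs_in_group
-- ===== SOURCE B (Python) =====
-- def get_procs_in_group(group, cores):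
--     # Descend the heap from `group`, emitting the contiguous block of leaf
--     # nodes met at each level: O(log cores + output) instead of a scan of all procs.
--     if group >= cores:
--         return [group - cores + 1]
--     if group <= 0:
--         return []
--     procs_in_group = []
--     lo = hi = group
--     while lo < cores:
--         lo, hi = 2 * lo, 2 * hi + 1
--         a = max(lo, cores)
--         b = min(hi, 2 * cores - 1)
--         procs_in_group.extend(range(a - cores + 1, b - cores + 2))
--     return procs_in_group
-- ===== Notes on version B (the rewrite author's own statement) =====
-- stated objective: faster
-- what changed: Instead of testing every proc 1..cores against its rebuilt ancestor chain, B descends the heap from the given node, emitting the contiguous block of leaf procs met at each level.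
import Mathlib
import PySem

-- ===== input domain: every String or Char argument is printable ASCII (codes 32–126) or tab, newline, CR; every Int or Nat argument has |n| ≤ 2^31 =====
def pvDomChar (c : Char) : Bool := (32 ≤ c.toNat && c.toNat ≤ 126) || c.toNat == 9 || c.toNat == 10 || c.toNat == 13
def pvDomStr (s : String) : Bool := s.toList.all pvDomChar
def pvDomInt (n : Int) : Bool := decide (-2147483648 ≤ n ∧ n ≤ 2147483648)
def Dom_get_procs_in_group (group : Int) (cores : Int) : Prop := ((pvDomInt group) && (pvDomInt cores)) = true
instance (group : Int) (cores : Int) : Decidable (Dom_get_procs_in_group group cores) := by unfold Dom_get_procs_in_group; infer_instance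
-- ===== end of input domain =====

-- B replaces A's per-proc ancestor-chain scan by a single descent of the heap from the
-- given node, emitting the contiguous block of leaf procs met at each level (faster).

-- ===== PORT A =====
-- the 'while group > 0' loop of get_groups
def pyGetGroupsLoop (group : Int) (groups : List Int) : List Int :=
  if h : group > 0 then
    pyGetGroupsLoop (PySem.Int.floordiv group 2) (groups ++ [group])
  else groups
termination_by group.toNat
decreasing_by
  rw [PySem.Int.floordiv_eq_ediv_of_pos (by norm_num : (0:Int) < 2)]
  omega

def get_groups (proc : Int) (procs : Int) : List Int :=
  (pyGetGroupsLoop (procs + proc - 1) []).reverse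

def get_procs_in_group (group : Int) (cores : Int) : List Int :=
  if group ≥ cores then
    [group - cores + 1]
  else
    (PySem.List.pyRange 1 (cores + 1) 1).foldl
      (fun acc i => if group ∈ get_groups i cores then acc ++ [i] else acc) []

-- ===== PORT B =====
-- the 'while lo < cores' level-descent loop of Source B (lo stays positive, hence the hypothesis)
def altLoop (lo hi cores : Int) (hpos : 0 < lo) : List Int :=
  if h : lo < cores then
    let lo' := 2 * lo
    let hi' := 2 * hi + 1
    let a := max lo' cores
    let b := min hi' (2 * cores - 1)
    PySem.List.pyRange (a - cores + 1) (b - cores + 2) 1 ++ altLoop lo' hi' cores (by omega)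
  else []
termination_by (cores - lo).toNat
decreasing_by omega

def get_procs_in_group_alt (group : Int) (cores : Int) : List Int :=
  if group ≥ cores then
    [group - cores + 1]
  else if h : group ≤ 0 then
    []
  else
    altLoop group group cores (by omega)

-- ===== PRECONDITION & SPEC =====
def Spec_get_procs_in_group (group : Int) (cores : Int) (out : List Int) : Prop := out = get_procs_in_group_alt group cores
instance (group : Int) (cores : Int) (out : List Int) : Decidable (Spec_get_procs_in_group group cores out) := by unfold Spec_get_procs_in_group; infer_instance

-- ===== CLAIM (what is proved, stated in full; the proofs are below) =====
def Claim_equal_get_procs_in_group : Prop := ∀ (group : Int) (cores : Int), Dom_get_procs_in_group group cores → Spec_get_procs_in_group group cores (get_procs_in_group group cores)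

-- ===== LEMMAS AND PROOFS =====

-- the sequence group, group//2, … of A's loop, as a plain list
def chain (n : Int) : List Int :=
  if h : 0 < n then n :: chain (PySem.Int.floordiv n 2) else []
termination_by n.toNat
decreasing_by
  rw [PySem.Int.floordiv_eq_ediv_of_pos (by norm_num : (0:Int) < 2)]
  omega

lemma pyGetGroupsLoop_eq (n : Int) (acc : List Int) :
    pyGetGroupsLoop n acc = acc ++ chain n := by
  fun_induction pyGetGroupsLoop n acc with
  | case1 n acc h ih =>
      rw [ih]
      conv_rhs => rw [chain]
      rw [dif_pos h]
      simp
  | case2 n acc h =>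
      rw [chain, dif_neg h, List.append_nil]

lemma mem_get_groups (g i c : Int) :
    g ∈ get_groups i c ↔ g ∈ chain (c + i - 1) := by
  unfold get_groups
  rw [pyGetGroupsLoop_eq, List.nil_append, List.mem_reverse]

lemma chain_pos (n : Int) : ∀ x ∈ chain n, 0 < x := by
  fun_induction chain n with
  | case1 n h ih =>
      intro x hx
      rcases List.mem_cons.mp hx with rfl | hx
      · exact h
      · exact ih x hx
  | case2 n h => intro x hx; simp at hx

lemma mem_chain_aux (g : Int) (hg : 0 < g) (N : Nat) :
    ∀ (n : Int), 0 ≤ n → n.toNat = N →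
      (g ∈ chain n ↔ ∃ d : Nat, g * 2 ^ d ≤ n ∧ n < (g + 1) * 2 ^ d) := by
  induction N using Nat.strong_induction_on with
  | _ N ih =>
    intro n hn hN
    by_cases h : 0 < n
    · rw [chain, dif_pos h, PySem.Int.floordiv_eq_ediv_of_pos (by norm_num : (0:Int) < 2)]
      have hrec := ih (n / 2).toNat (by omega) (n / 2) (by omega) rfl
      rw [List.mem_cons, hrec]
      constructor
      · rintro (rfl | ⟨d, h1, h2⟩)
        · exact ⟨0, by simp, by simp⟩
        · refine ⟨d + 1, ?_, ?_⟩
          · have e1 : (g : Int) * 2 ^ (d + 1) = (g * 2 ^ d) * 2 := by ring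
            rw [e1]; omega
          · have e2 : ((g : Int) + 1) * 2 ^ (d + 1) = ((g + 1) * 2 ^ d) * 2 := by ring
            rw [e2]; omega
      · rintro ⟨d, h1, h2⟩
        cases d with
        | zero =>
            left
            simp only [pow_zero, mul_one] at h1 h2
            omega
        | succ d =>
            right
            refine ⟨d, ?_, ?_⟩
            · have e1 : (g : Int) * 2 ^ (d + 1) = (g * 2 ^ d) * 2 := by ring
              rw [e1] at h1; omega
            · have e2 : ((g : Int) + 1) * 2 ^ (d + 1) = ((g + 1) * 2 ^ d) * 2 := by ring
              rw [e2] at h2; omega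
    · rw [chain, dif_neg h]
      simp only [List.not_mem_nil, false_iff, not_exists, not_and]
      intro d h1
      have hp : (0 : Int) < g * 2 ^ d := mul_pos hg (by positivity)
      omega

lemma mem_chain (g n : Int) (hg : 0 < g) (hn : 0 ≤ n) :
    g ∈ chain n ↔ ∃ d : Nat, g * 2 ^ d ≤ n ∧ n < (g + 1) * 2 ^ d :=
  mem_chain_aux g hg n.toNat n hn rfl

-- filtering a unit-step range by a lower bound is again a range
lemma filter_le_pyRange_aux (t : Int) (N : Nat) :
    ∀ (s e : Int), (e - s).toNat = N →
      (PySem.List.pyRange s e 1).filter (fun i => decide (t ≤ i)) =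
        PySem.List.pyRange (max s t) e 1 := by
  induction N using Nat.strong_induction_on with
  | _ N ih =>
    intro s e hN
    by_cases h : s < e
    · rw [PySem.List.pyRange_one_cons h]
      have hrec := ih (e - (s + 1)).toNat (by omega) (s + 1) e rfl
      by_cases ht : t ≤ s
      · rw [List.filter_cons_of_pos (by simpa using ht), hrec]
        have h1 : max (s + 1) t = s + 1 := by omega
        have h2 : max s t = s := by omega
        rw [h1, h2, PySem.List.pyRange_one_cons h]
      · rw [List.filter_cons_of_neg (by simpa using ht), hrec]
        have h1 : max (s + 1) t = max s t := by omega
        rw [h1]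
    · rw [PySem.List.pyRange_one_eq_nil (by omega),
        PySem.List.pyRange_one_eq_nil (by omega : e ≤ max s t), List.filter_nil]

lemma filter_le_pyRange (t s e : Int) :
    (PySem.List.pyRange s e 1).filter (fun i => decide (t ≤ i)) =
      PySem.List.pyRange (max s t) e 1 :=
  filter_le_pyRange_aux t (e - s).toNat s e rfl

-- a node n strictly below level k and not past level k+1 is under g iff it lies in level k+1's interval
lemma level_char (g lo hi n : Int) (k : Nat) (hg : 0 < g)
    (hlo : lo = g * 2 ^ k) (hhi : hi = (g + 1) * 2 ^ k - 1)
    (hn : hi < n) (hn2 : n ≤ 2 * hi + 1) (hn0 : 0 ≤ n) :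
    (g ∈ chain n) ↔ (2 * lo ≤ n) := by
  have hpow : (0 : Int) < 2 ^ k := by positivity
  rw [mem_chain g n hg hn0]
  constructor
  · rintro ⟨d, h1, h2⟩
    by_cases hd1 : d ≤ k
    · exfalso
      have hmono : (g + 1) * 2 ^ d ≤ (g + 1) * 2 ^ k :=
        mul_le_mul_of_nonneg_left (pow_le_pow_right₀ (by norm_num) hd1) (by omega)
      linarith
    · by_cases hd2 : d = k + 1
      · subst hd2
        have e1 : g * 2 ^ (k + 1) = 2 * lo := by rw [hlo]; ring
        linarith
      · exfalso
        have hd3 : k + 2 ≤ d := by omega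
        have hmono : g * 2 ^ (k + 2) ≤ g * 2 ^ d :=
          mul_le_mul_of_nonneg_left (pow_le_pow_right₀ (by norm_num) hd3) (by omega)
        have e1 : g * 2 ^ (k + 2) = 4 * lo := by rw [hlo]; ring
        have hk1 : (2 : Int) ^ k ≤ lo := by rw [hlo]; nlinarith
        have hd : hi + 1 = lo + 2 ^ k := by rw [hlo, hhi]; ring
        linarith
  · intro h1
    refine ⟨k + 1, ?_, ?_⟩
    · have e1 : g * 2 ^ (k + 1) = 2 * lo := by rw [hlo]; ring
      linarith
    · have e2 : (g + 1) * 2 ^ (k + 1) = 2 * hi + 2 := by rw [hhi]; ring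
      linarith

-- generalized descent lemma: one level of B's loop collects exactly the procs whose
-- leaf lies strictly below the current interval
lemma altLoop_spec_aux (g c : Int) (hg : 0 < g) (N : Nat) :
    ∀ (k : Nat) (lo hi : Int), lo = g * 2 ^ k → hi = (g + 1) * 2 ^ k - 1 →
      (c - lo).toNat = N → ∀ (hpos : 0 < lo),
      altLoop lo hi c hpos =
        (PySem.List.pyRange 1 (c + 1) 1).filter
          (fun i => decide (hi < c + i - 1 ∧ g ∈ chain (c + i - 1))) := by
  induction N using Nat.strong_induction_on with
  | _ N ih =>
    intro k lo hi hlo hhi hN hpos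
    have hpow : (0 : Int) < 2 ^ k := by positivity
    have hk1 : (2 : Int) ^ k ≤ lo := by rw [hlo]; nlinarith
    have hdiff : hi + 1 = lo + 2 ^ k := by rw [hlo, hhi]; ring
    by_cases h : lo < c
    · rw [altLoop, dif_pos h]
      have hrec := ih (c - 2 * lo).toNat (by omega) (k + 1) (2 * lo) (2 * hi + 1)
        (by rw [hlo]; ring) (by rw [hhi]; ring) rfl (by omega)
      show PySem.List.pyRange (max (2 * lo) c - c + 1) (min (2 * hi + 1) (2 * c - 1) - c + 2) 1 ++
          altLoop (2 * lo) (2 * hi + 1) c (by omega) = _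
      rw [hrec]
      -- split the proc range at the first proc past this level's interval
      have hsplit : PySem.List.pyRange 1 (c + 1) 1 =
          PySem.List.pyRange 1 (max 1 (min (2 * hi + 1) (2 * c - 1) - c + 2)) 1 ++
          PySem.List.pyRange (max 1 (min (2 * hi + 1) (2 * c - 1) - c + 2)) (c + 1) 1 :=
        PySem.List.pyRange_one_append 1 _ (c + 1) (by omega) (by omega)
      -- no proc of the left part lies below the next level
      have hfilter1 : List.filter (fun i => decide (2 * hi + 1 < c + i - 1 ∧ g ∈ chain (c + i - 1)))
          (PySem.List.pyRange 1 (max 1 (min (2 * hi + 1) (2 * c - 1) - c + 2)) 1) = [] := by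
        rw [List.filter_eq_nil_iff]
        intro i hi3
        rw [PySem.List.mem_pyRange_one] at hi3
        simp only [decide_eq_true_eq, not_and]
        intro hgt
        exact absurd hgt (by omega)
      -- on the right part the two level bounds agree
      have hfilter2 : List.filter (fun i => decide (2 * hi + 1 < c + i - 1 ∧ g ∈ chain (c + i - 1)))
          (PySem.List.pyRange (max 1 (min (2 * hi + 1) (2 * c - 1) - c + 2)) (c + 1) 1) =
          List.filter (fun i => decide (hi < c + i - 1 ∧ g ∈ chain (c + i - 1)))
          (PySem.List.pyRange (max 1 (min (2 * hi + 1) (2 * c - 1) - c + 2)) (c + 1) 1) := by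
        apply List.filter_congr
        intro i hi3
        rw [PySem.List.mem_pyRange_one] at hi3
        simp only [decide_eq_decide]
        constructor
        · rintro ⟨h1, h2⟩; exact ⟨by omega, h2⟩
        · rintro ⟨h1, h2⟩; exact ⟨by omega, h2⟩
      -- the left part's filter is exactly the emitted contiguous block
      have hlevel : List.filter (fun i => decide (hi < c + i - 1 ∧ g ∈ chain (c + i - 1)))
          (PySem.List.pyRange 1 (max 1 (min (2 * hi + 1) (2 * c - 1) - c + 2)) 1) =
          PySem.List.pyRange (max (2 * lo) c - c + 1) (min (2 * hi + 1) (2 * c - 1) - c + 2) 1 := by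
        have hcongr : List.filter (fun i => decide (hi < c + i - 1 ∧ g ∈ chain (c + i - 1)))
            (PySem.List.pyRange 1 (max 1 (min (2 * hi + 1) (2 * c - 1) - c + 2)) 1) =
            List.filter (fun i => decide (max (2 * lo) c - c + 1 ≤ i))
            (PySem.List.pyRange 1 (max 1 (min (2 * hi + 1) (2 * c - 1) - c + 2)) 1) := by
          apply List.filter_congr
          intro i hi3
          rw [PySem.List.mem_pyRange_one] at hi3
          simp only [decide_eq_decide]
          by_cases hn : hi < c + i - 1
          · have hmm := level_char g lo hi (c + i - 1) k hg hlo hhi hn (by omega) (by omega)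
            constructor
            · rintro ⟨_, h2⟩
              rw [hmm] at h2
              omega
            · intro h1
              exact ⟨hn, by rw [hmm]; omega⟩
          · constructor
            · rintro ⟨h1, _⟩
              exact absurd h1 hn
            · intro h1
              exfalso
              omega
        rw [hcongr, filter_le_pyRange]
        by_cases hb : 1 ≤ min (2 * hi + 1) (2 * c - 1) - c + 2
        · rw [show max (1:Int) (max (2 * lo) c - c + 1) = max (2 * lo) c - c + 1 by omega,
              show max (1:Int) (min (2 * hi + 1) (2 * c - 1) - c + 2) = min (2 * hi + 1) (2 * c - 1) - c + 2 by omega]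
        · rw [PySem.List.pyRange_one_eq_nil (by omega), PySem.List.pyRange_one_eq_nil (by omega)]
      rw [hsplit, List.filter_append, List.filter_append, hfilter1, hfilter2, hlevel]
      simp
    · rw [altLoop, dif_neg h]
      symm
      rw [List.filter_eq_nil_iff]
      intro i hi2
      rw [PySem.List.mem_pyRange_one] at hi2
      simp only [decide_eq_true_eq, not_and]
      intro hgt hmem
      rw [mem_chain g _ hg (by omega)] at hmem
      obtain ⟨d, h1, h2⟩ := hmem
      by_cases hd1 : d ≤ k
      · have hmono : (g + 1) * 2 ^ d ≤ (g + 1) * 2 ^ k :=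
          mul_le_mul_of_nonneg_left (pow_le_pow_right₀ (by norm_num) hd1) (by omega)
        linarith
      · have hmono : g * 2 ^ (k + 1) ≤ g * 2 ^ d :=
          mul_le_mul_of_nonneg_left (pow_le_pow_right₀ (by norm_num) (by omega)) (by omega)
        have e1 : g * 2 ^ (k + 1) = 2 * lo := by rw [hlo]; ring
        linarith

-- ===== VERDICT (by name: the statement is the Claim_ definition above) =====
theorem get_procs_in_group_spec : Claim_equal_get_procs_in_group := by
  intro g c _
  unfold Spec_get_procs_in_group get_procs_in_group get_procs_in_group_alt
  by_cases hgc : g ≥ c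
  · rw [if_pos hgc, if_pos hgc]
  · rw [if_neg hgc, if_neg hgc, PySem.List.foldl_append_ite_eq_filter]
    by_cases hg : g ≤ 0
    · rw [dif_pos hg, List.nil_append, List.filter_eq_nil_iff]
      intro i _
      simp only [decide_eq_true_eq]
      intro hmem
      rw [mem_get_groups] at hmem
      exact absurd (chain_pos _ g hmem) (by omega)
    · rw [dif_neg hg, List.nil_append,
        altLoop_spec_aux g c (by omega) (c - g).toNat 0 g g (by ring) (by ring) rfl (by omega)]
      apply List.filter_congr
      intro i hi2
      rw [PySem.List.mem_pyRange_one] at hi2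
      simp only [decide_eq_decide]
      rw [mem_get_groups]
      constructor
      · intro hmem
        exact ⟨by omega, hmem⟩
      · rintro ⟨_, hmem⟩
        exact hmem
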